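-- pv_equiv track=rewrite | github.com/GustasG/Project-Euler | solved/problem_77.py | sum_partition
-- ===== SOURCE A (Python) =====
-- def sum_partition(numbers: list[int], size: int, target: int) -> int:
--     if target == 0:
--         return 1
--
--     if target < 0:
--         return 0
--
--     if size <= 0 and target >= 1:
--         return 0
--
--     return sum_partition(numbers, size - 1, target) + sum_partition(numbers, size, target - numbers[size - 1])
-- ===== SOURCE B (Python) =====
-- def sum_partition(numbers, size, target):
--     if target == 0:
--         return 1
--     if target < 0:
--         return 0
--     if size <= 0:
--         return 0
--     dp = [1] + [0] * target
--     for c in numbers[:size]: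
--         dp = [sum(dp[t - k * c] for k in range(t // c + 1)) for t in range(target + 1)]
--     return dp[target]
-- ===== Notes on version B (the rewrite author's own statement) =====
-- stated objective: faster
-- what changed: A's exponential two-way recursion (include/skip the last number) is replaced by an iterative dynamic-programming table over targets 0..target updated once per number; intended as asymptotically faster (a timing run saw A time out at n=16 where B returned; no clean ratio could be measured).
import Mathlib
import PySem

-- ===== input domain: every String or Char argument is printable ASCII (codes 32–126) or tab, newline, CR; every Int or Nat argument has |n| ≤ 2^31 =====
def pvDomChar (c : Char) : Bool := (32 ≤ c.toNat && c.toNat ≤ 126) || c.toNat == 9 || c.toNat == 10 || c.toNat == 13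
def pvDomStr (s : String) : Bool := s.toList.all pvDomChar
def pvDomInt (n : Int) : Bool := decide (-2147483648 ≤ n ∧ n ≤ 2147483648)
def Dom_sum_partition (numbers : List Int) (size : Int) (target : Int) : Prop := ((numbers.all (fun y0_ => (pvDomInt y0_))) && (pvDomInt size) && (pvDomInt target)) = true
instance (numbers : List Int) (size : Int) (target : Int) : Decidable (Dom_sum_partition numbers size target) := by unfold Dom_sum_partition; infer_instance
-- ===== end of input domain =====

-- B replaces A's exponential two-branch recursion by a coin-by-coin DP table over targets; intended as faster (timing: A timed out at n=16 where B returned; no clean ratio measured).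


-- ===== PORT A =====
-- A's recursion is not structurally decreasing (it diverges in Python when a used number is ≤ 0),
-- so the port threads fuel; the wrapper passes enough fuel for every input Pre_ admits.
-- numbers[size - 1] is pyGet?; its none case (IndexError) is excluded by Pre_ and defaulted to 0 here.
def sumPartitionFuel : Nat → List Int → Int → Int → Int
  | 0, _, _, _ => 0
  | f + 1, numbers, size, target =>
    if target = 0 then 1
    else if target < 0 then 0
    else if size ≤ 0 ∧ 1 ≤ target then 0
    else
      sumPartitionFuel f numbers (size - 1) target +
        sumPartitionFuel f numbers size (target - (PySem.List.pyGet? numbers (size - 1)).getD 0)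

def sum_partition (numbers : List Int) (size : Int) (target : Int) : Int :=
  sumPartitionFuel (size.toNat + target.toNat + 1) numbers size target

-- ===== PORT B =====
-- sum(dp[t - k * c] for k in range(t // c + 1))
def rowVal (dp : List Int) (c : Int) (t : Int) : Int :=
  (PySem.List.pyRange 0 (PySem.Int.floordiv t c + 1) 1).foldl
    (fun v k => v + (PySem.List.pyGet? dp (t - k * c)).getD 0) 0

def sum_partition_alt (numbers : List Int) (size : Int) (target : Int) : Int :=
  if target = 0 then 1
  else if target < 0 then 0
  else if size ≤ 0 then 0
  else
    let dp :=
      (PySem.List.slice numbers none (some size)).foldl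
        (fun dp c => (PySem.List.pyRange 0 (target + 1) 1).map (fun t => rowVal dp c t))
        (1 :: List.replicate target.toNat 0)
    (PySem.List.pyGet? dp target).getD 0

-- ===== PRECONDITION & SPEC =====
-- Pre_ is exactly where the Python A returns: with target ≥ 1 and size ≥ 1 it reads numbers[size-1]
-- (IndexError when size > len(numbers)) and recurses forever when any of numbers[:size] is ≤ 0.
def Pre_sum_partition (numbers : List Int) (size : Int) (target : Int) : Prop :=
  target ≤ 0 ∨ size ≤ 0 ∨ (size ≤ (numbers.length : Int) ∧ ∀ x ∈ numbers.take size.toNat, 0 < x)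
instance (numbers : List Int) (size : Int) (target : Int) : Decidable (Pre_sum_partition numbers size target) := by unfold Pre_sum_partition; infer_instance

def pvWitness_sum_partition : List Int × Int × Int := ([1, 2, 5], 3, 10)

def Spec_sum_partition (numbers : List Int) (size : Int) (target : Int) (out : Int) : Prop := out = sum_partition_alt numbers size target
instance (numbers : List Int) (size : Int) (target : Int) (out : Int) : Decidable (Spec_sum_partition numbers size target out) := by unfold Spec_sum_partition; infer_instance

-- ===== CLAIM (what is proved, stated in full; the proofs are below) =====
def Claim_equal_sum_partition : Prop := ∀ (numbers : List Int) (size : Int) (target : Int), Dom_sum_partition numbers size target → Pre_sum_partition numbers size target → Spec_sum_partition numbers size target (sum_partition numbers size target)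

-- ===== LEMMAS AND PROOFS =====

def cnt : List Int → Nat → Int
  | [], t => if t = 0 then 1 else 0
  | c :: cs, t =>
    cnt cs t + (if _h : 0 < c ∧ c ≤ (t : Int) then cnt (c :: cs) (t - c.toNat) else 0)
termination_by cs t => (cs.length, t)
decreasing_by
  · exact Prod.Lex.left _ _ (by simp)
  · exact Prod.Lex.right _ (by omega)

theorem cnt_zero (cs : List Int) : cnt cs 0 = 1 := by
  induction cs with
  | nil => simp [cnt]
  | cons c cs ih => rw [cnt]; rw [dif_neg (by omega)]; omega

theorem cnt_cons_eq_sum (c : Int) (cs : List Int) (hc : 0 < c) (t : Nat) :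
    cnt (c :: cs) t = ((List.range (t / c.toNat + 1)).map (fun k => cnt cs (t - k * c.toNat))).sum := by
  induction t using Nat.strong_induction_on with
  | _ t ih =>
    rw [cnt]
    by_cases h : c ≤ (t : Int)
    · have h1 : 0 < c.toNat := by omega
      have h2 : c.toNat ≤ t := by omega
      rw [dif_pos ⟨hc, h⟩]
      rw [show t / c.toNat + 1 = ((t - c.toNat) / c.toNat + 1) + 1 by
            rw [Nat.div_eq_sub_div h1 h2]]
      rw [List.range_succ_eq_map, List.map_cons, List.map_map, List.sum_cons,
        ih (t - c.toNat) (by omega)]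
      congr 1
      · simp
      · apply congrArg
        apply List.map_congr_left
        intro k _
        show cnt cs (t - c.toNat - k * c.toNat) = cnt cs (t - (k + 1) * c.toNat)
        rw [Nat.succ_mul]
        congr 1
        omega
    · rw [dif_neg (by omega)]
      have h0 : t / c.toNat = 0 := Nat.div_eq_of_lt (by omega)
      simp [h0]

theorem fuel_eq_cnt (fuel : Nat) (numbers : List Int) (size target : Int)
    (hlen : size ≤ (numbers.length : Int))
    (hpos : ∀ x ∈ numbers.take size.toNat, 0 < x)
    (hfuel : size.toNat + target.toNat < fuel) :
    sumPartitionFuel fuel numbers size target =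
      if target < 0 then 0 else cnt (numbers.take size.toNat).reverse target.toNat := by
  induction fuel generalizing size target with
  | zero => omega
  | succ f ih =>
    rw [sumPartitionFuel]
    by_cases ht0 : target = 0
    · subst ht0; simp [cnt_zero]
    · by_cases htn : target < 0
      · rw [if_neg ht0, if_pos htn, if_pos htn]
      · have ht1 : 1 ≤ target := by omega
        rw [if_neg ht0, if_neg htn, if_neg htn]
        by_cases hs : size ≤ 0
        · rw [if_pos ⟨hs, ht1⟩]
          have : size.toNat = 0 := by omega
          rw [this]
          simp [cnt]
          omega
        · rw [if_neg (by omega)]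
          have hn1 : 1 ≤ size.toNat := by omega
          have hnl : size.toNat ≤ numbers.length := by omega
          have hidx : size - 1 = ((size.toNat - 1 : Nat) : Int) := by omega
          have hlt : size.toNat - 1 < numbers.length := by omega
          rw [hidx, PySem.List.pyGet?_natCast, List.getElem?_eq_getElem hlt, Option.getD_some]
          set c := numbers[size.toNat - 1] with hcdef
          have hmemtake : c ∈ numbers.take size.toNat := by
            rw [hcdef]
            rw [show numbers[size.toNat - 1] = (numbers.take size.toNat)[size.toNat - 1]'(by
              rw [List.length_take]; omega) from (List.getElem_take ..).symm]
            exact List.getElem_mem _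
          have hc : 0 < c := hpos _ hmemtake
          have htk : numbers.take size.toNat = numbers.take (size.toNat - 1) ++ [c] := by
            rw [show size.toNat = (size.toNat - 1) + 1 by omega, List.take_add_one,
              List.getElem?_eq_getElem hlt]
            rfl
          have hrev : (numbers.take size.toNat).reverse = c :: (numbers.take (size.toNat - 1)).reverse := by
            rw [htk, List.reverse_append, List.reverse_singleton]
            rfl
          have hpos' : ∀ x ∈ numbers.take (size - 1).toNat, 0 < x := by
            intro x hx
            apply hpos
            have hmin : (size - 1).toNat = min ((size - 1).toNat) size.toNat := by omega
            rw [hmin, ← List.take_take] at hx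
            exact List.mem_of_mem_take hx
          have ih1 : sumPartitionFuel f numbers (size - 1) target
              = cnt (numbers.take (size - 1).toNat).reverse target.toNat := by
            rw [ih (size - 1) target (by omega) hpos' (by omega), if_neg htn]
          have ih2 : sumPartitionFuel f numbers size (target - c)
              = if target - c < 0 then 0 else cnt (numbers.take size.toNat).reverse (target - c).toNat :=
            ih size (target - c) hlen hpos (by omega)
          rw [hidx] at ih1
          have hnn : ((size.toNat - 1 : Nat) : Int).toNat = size.toNat - 1 := by omega
          rw [hnn] at ih1
          rw [ih1, ih2, hrev]
          conv_rhs => rw [cnt]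
          by_cases hct : c ≤ target
          · rw [if_neg (by omega), dif_pos ⟨hc, by omega⟩]
            have he : (target - c).toNat = target.toNat - c.toNat := by omega
            rw [he]
          · rw [if_pos (by omega), dif_neg (by omega)]

theorem rowVal_eq (rev : List Int) (T : Nat) (c : Int) (hc : 0 < c) (t : Nat) (ht : t ≤ T) :
    rowVal ((List.range (T + 1)).map (fun u => cnt rev u)) c (t : Int) = cnt (c :: rev) t := by
  unfold rowVal
  rw [show c = ((c.toNat : Nat) : Int) by omega, PySem.Int.floordiv_natCast,
    show ((t / c.toNat : Nat) : Int) + 1 = ((t / c.toNat + 1 : Nat) : Int) by push_cast; ring,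
    PySem.List.pyRange_zero_nat, List.foldl_map]
  have hstep : ∀ (v : Int) (k : Nat), k ∈ List.range (t / c.toNat + 1) →
      v + (PySem.List.pyGet? ((List.range (T + 1)).map (fun u => cnt rev u))
            ((t : Int) - (k : Int) * ((c.toNat : Nat) : Int))).getD 0
        = v + cnt rev (t - k * c.toNat) := by
    intro v k hk
    rw [List.mem_range] at hk
    have hkc : k * c.toNat ≤ t := by
      have := Nat.div_mul_le_self t c.toNat
      calc k * c.toNat ≤ (t / c.toNat) * c.toNat := by
            apply Nat.mul_le_mul_right; omega
        _ ≤ t := this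
    rw [show (t : Int) - (k : Int) * ((c.toNat : Nat) : Int) = ((t - k * c.toNat : Nat) : Int) by
          push_cast [hkc]; ring]
    rw [PySem.List.pyGet?_natCast, List.getElem?_map, List.getElem?_range (by omega)]
    rfl
  rw [PySem.List.foldl_congr_mem _ _ _ _ hstep, PySem.List.foldl_add, zero_add,
    cnt_cons_eq_sum _ rev (by omega) t]
  simp [show max c 0 = c by omega]

theorem init_dp (T : Nat) :
    (1 : Int) :: List.replicate T 0 = (List.range (T + 1)).map (fun u => cnt [] u) := by
  rw [List.range_succ_eq_map, List.map_cons, List.map_map]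
  simp [cnt, Function.comp_def, List.map_const']

theorem dp_fold (T : Nat) (coins : List Int) : ∀ (rev : List Int), (∀ c ∈ coins, 0 < c) →
    coins.foldl
      (fun dp c => (PySem.List.pyRange 0 ((T : Int) + 1) 1).map (fun t => rowVal dp c t))
      ((List.range (T + 1)).map (fun u => cnt rev u))
    = (List.range (T + 1)).map (fun u => cnt (coins.reverse ++ rev) u) := by
  induction coins with
  | nil => intro rev _; simp
  | cons c coins ih =>
    intro rev hpos
    rw [List.foldl_cons]
    have hstep : (PySem.List.pyRange 0 ((T : Int) + 1) 1).map
          (fun t => rowVal ((List.range (T + 1)).map (fun u => cnt rev u)) c t)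
        = (List.range (T + 1)).map (fun u => cnt (c :: rev) u) := by
      rw [show ((T : Int) + 1) = ((T + 1 : Nat) : Int) by push_cast; ring,
        PySem.List.pyRange_zero_nat, List.map_map]
      apply List.map_congr_left
      intro t htmem
      rw [List.mem_range] at htmem
      exact rowVal_eq rev T c (hpos c (by simp)) t (by omega)
    rw [hstep, ih (c :: rev) (fun x hx => hpos x (by simp [hx]))]
    rw [List.reverse_cons, List.append_assoc]
    rfl

theorem alt_eq_cnt (numbers : List Int) (size target : Int)
    (hs : 1 ≤ size) (ht : 1 ≤ target)
    (hpos : ∀ x ∈ numbers.take size.toNat, 0 < x) :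
    sum_partition_alt numbers size target = cnt (numbers.take size.toNat).reverse target.toNat := by
  unfold sum_partition_alt
  simp only [if_neg (show ¬ target = 0 by omega), if_neg (show ¬ target < 0 by omega),
    if_neg (show ¬ size ≤ 0 by omega)]
  rw [PySem.List.slice_to numbers (by omega)]
  have htar : target = ((target.toNat : Nat) : Int) := by omega
  rw [show (1 : Int) :: List.replicate target.toNat 0
      = (List.range (target.toNat + 1)).map (fun u => cnt [] u) from init_dp target.toNat]
  rw [show (fun dp c => (PySem.List.pyRange 0 (target + 1) 1).map (fun t => rowVal dp c t))
      = (fun dp c => (PySem.List.pyRange 0 ((target.toNat : Int) + 1) 1).map (fun t => rowVal dp c t)) by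
    rw [← htar]]
  rw [dp_fold target.toNat (numbers.take size.toNat) [] hpos, List.append_nil]
  conv_lhs => rw [htar]
  rw [PySem.List.pyGet?_natCast, List.getElem?_map, List.getElem?_range (by omega)]
  rfl

-- ===== VERDICT (by name: the statement is the Claim_ definition above) =====
theorem sum_partition_spec : Claim_equal_sum_partition := by
  intro numbers size target _ hpre
  unfold Spec_sum_partition
  show sumPartitionFuel (size.toNat + target.toNat + 1) numbers size target
        = sum_partition_alt numbers size target
  by_cases ht0 : target = 0
  · subst ht0; rw [sumPartitionFuel, sum_partition_alt]; simp
  · by_cases htn : target < 0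
    · rw [sumPartitionFuel, sum_partition_alt]
      rw [if_neg ht0, if_pos htn, if_neg ht0, if_pos htn]
    · by_cases hs : size ≤ 0
      · rw [sumPartitionFuel, sum_partition_alt]
        rw [if_neg ht0, if_neg htn, if_pos ⟨hs, by omega⟩, if_neg ht0, if_neg htn, if_pos hs]
      · rcases hpre with h | h | ⟨hlen, hpos⟩ <;> try omega
        rw [fuel_eq_cnt _ _ _ _ hlen hpos (by omega), if_neg htn]
        rw [alt_eq_cnt numbers size target (by omega) (by omega) hpos]
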